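-- pv_equiv track=rewrite | github.com/ytlzq0228/RPI_Tracker | RPI_Tracker.py | get_constellation
-- ===== SOURCE A (Python) =====
-- def get_constellation(prn):
-- 	# PRN 号与星座映射
-- 	constellation_map = {
-- 		'GPS': range(1, 32),
-- 		'SBAS': range(33, 64),
-- 		'GL': range(65, 97),
-- 		'GA': range(301, 337),
-- 		'BD': range(401, 431),
-- 		'QZSS': range(193, 198),
-- 		'IRNSS': range(401, 408),
-- 		'WAAS': range(133, 139),
-- 		'EGNOS': range(120, 139),
-- 		'GAGAN': range(127, 129),
-- 		'MSAS': range(129, 138),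
-- 	}
--
-- 	for constellation, prns in constellation_map.items():
-- 		if prn in prns:
-- 			return f"{constellation}_{prn}"
-- 	return f"Unknow_{prn}"
-- ===== SOURCE B (Python) =====
-- # B: precompute one flat PRN->name table at module load (setdefault keeps first match on overlaps); lookup is O(1) instead of scanning 11 ranges.
-- _CONSTELLATION_MAP = {
-- 	'GPS': range(1, 32),
-- 	'SBAS': range(33, 64),
-- 	'GL': range(65, 97),
-- 	'GA': range(301, 337),
-- 	'BD': range(401, 431),
-- 	'QZSS': range(193, 198),
-- 	'IRNSS': range(401, 408),
-- 	'WAAS': range(133, 139),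
-- 	'EGNOS': range(120, 139),
-- 	'GAGAN': range(127, 129),
-- 	'MSAS': range(129, 138),
-- }
-- _TABLE = {}
-- for _name, _prns in _CONSTELLATION_MAP.items():
-- 	for _p in _prns:
-- 		_TABLE.setdefault(_p, _name)
--
-- def get_constellation(prn):
-- 	name = _TABLE.get(prn)
-- 	return f"{name}_{prn}" if name is not None else f"Unknow_{prn}"
-- ===== Notes on version B (the rewrite author's own statement) =====
-- stated objective: idiomatic
-- what changed: B precomputes once, at module load, a flat dict mapping every PRN to its constellation (setdefault preserves first-match-wins on overlapping ranges) and answers each call with a single dict lookup instead of scanning the constellation ranges one by one.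
import Mathlib
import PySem

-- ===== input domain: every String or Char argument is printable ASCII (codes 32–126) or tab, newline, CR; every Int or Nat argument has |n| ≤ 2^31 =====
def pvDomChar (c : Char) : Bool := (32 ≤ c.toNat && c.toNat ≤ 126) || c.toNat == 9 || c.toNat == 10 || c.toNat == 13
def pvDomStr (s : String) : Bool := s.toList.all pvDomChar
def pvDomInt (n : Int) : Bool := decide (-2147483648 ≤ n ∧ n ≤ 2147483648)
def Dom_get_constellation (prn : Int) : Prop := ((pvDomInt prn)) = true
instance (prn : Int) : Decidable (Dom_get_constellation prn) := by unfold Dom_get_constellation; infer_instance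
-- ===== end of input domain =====

-- B replaces A's scan over the constellation ranges with a flat PRN->name table built once at module load
-- (setdefault: first constellation wins on overlaps) and a single dict lookup (alternative/idiomatic).


-- ===== PORT A =====
-- constellation_map, a literal dict in insertion order (values: range(a, b) as the list of its elements)
def pvConstellationMap : List (String × List Int) :=
  [("GPS", PySem.List.pyRange 1 32 1), ("SBAS", PySem.List.pyRange 33 64 1),
   ("GL", PySem.List.pyRange 65 97 1), ("GA", PySem.List.pyRange 301 337 1),
   ("BD", PySem.List.pyRange 401 431 1), ("QZSS", PySem.List.pyRange 193 198 1),
   ("IRNSS", PySem.List.pyRange 401 408 1), ("WAAS", PySem.List.pyRange 133 139 1),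
   ("EGNOS", PySem.List.pyRange 120 139 1), ("GAGAN", PySem.List.pyRange 127 129 1),
   ("MSAS", PySem.List.pyRange 129 138 1)]

-- A's loop: first (constellation, prns) with prn in prns wins, else "Unknow_{prn}"
def pvFindA (prn : Int) : List (String × List Int) → String
  | [] => "Unknow_" ++ PySem.Int.toStr prn
  | (c, prns) :: rest =>
      if prns.contains prn then c ++ "_" ++ PySem.Int.toStr prn else pvFindA prn rest

def get_constellation (prn : Int) : String := pvFindA prn pvConstellationMap

-- ===== PORT B =====
-- Source B's module constant _TABLE: the double setdefault loop over the same literal map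
def pvTable : PySem.Dict Int String :=
  pvConstellationMap.foldl
    (fun d np => np.2.foldl (fun d p => d.setdefault p np.1) d) PySem.Dict.empty

def get_constellation_alt (prn : Int) : String :=
  match pvTable.get? prn with
  | some name => name ++ "_" ++ PySem.Int.toStr prn
  | none => "Unknow_" ++ PySem.Int.toStr prn

-- ===== PRECONDITION & SPEC =====
def Spec_get_constellation (prn : Int) (out : String) : Prop := out = get_constellation_alt prn
instance (prn : Int) (out : String) : Decidable (Spec_get_constellation prn out) := by unfold Spec_get_constellation; infer_instance

-- ===== CLAIM (what is proved, stated in full; the proofs are below) =====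
def Claim_equal_get_constellation : Prop := ∀ (prn : Int), Dom_get_constellation prn → Spec_get_constellation prn (get_constellation prn)

-- ===== LEMMAS AND PROOFS =====

-- a setdefault at a key other than x does not change get? x
theorem pv_get?_setdefault_of_ne (d : PySem.Dict Int String) (k : Int) (v : String) (x : Int)
    (h : x ≠ k) : (d.setdefault k v).get? x = d.get? x := by
  by_cases hc : d.contains k
  · rw [PySem.Dict.setdefault_of_contains d v hc]
  · rw [PySem.Dict.setdefault_of_not_contains d v (by simpa using hc),
        PySem.Dict.get?_insert_of_ne d v h]

-- a setdefault loop over a list of keys: existing entries win, new keys get `name`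
theorem pv_fold_setdefault_get? (l : List Int) (name : String) (d : PySem.Dict Int String)
    (x : Int) :
    (l.foldl (fun d p => d.setdefault p name) d).get? x
      = Option.orElse (d.get? x) (fun _ => if x ∈ l then some name else none) := by
  induction l generalizing d with
  | nil =>
      simp only [List.foldl_nil, List.not_mem_nil, if_false]
      cases d.get? x <;> rfl
  | cons a t ih =>
      simp only [List.foldl_cons, ih, List.mem_cons]
      by_cases hx : x = a
      · subst hx
        rw [PySem.Dict.get?_setdefault_self]
        cases d.get? x <;> simp [Option.orElse]
      · rw [pv_get?_setdefault_of_ne d a name x hx]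
        cases d.get? x <;> simp [Option.orElse, hx]

theorem pv_orElse_none (g : Unit → Option String) : Option.orElse none g = g () := rfl

theorem pv_orElse_if (c : Prop) [Decidable c] (a : String) (x : Option String)
    (g : Unit → Option String) :
    Option.orElse (if c then some a else x) g
      = if c then some a else Option.orElse x g := by
  split_ifs <;> rfl

-- the table Source B builds, looked up: first constellation (in insertion order) wins
set_option maxHeartbeats 1600000 in
theorem pv_get?_table (prn : Int) :
    pvTable.get? prn =
      if 1 ≤ prn ∧ prn < 32 then some "GPS"
      else if 33 ≤ prn ∧ prn < 64 then some "SBAS"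
      else if 65 ≤ prn ∧ prn < 97 then some "GL"
      else if 301 ≤ prn ∧ prn < 337 then some "GA"
      else if 401 ≤ prn ∧ prn < 431 then some "BD"
      else if 193 ≤ prn ∧ prn < 198 then some "QZSS"
      else if 401 ≤ prn ∧ prn < 408 then some "IRNSS"
      else if 133 ≤ prn ∧ prn < 139 then some "WAAS"
      else if 120 ≤ prn ∧ prn < 139 then some "EGNOS"
      else if 127 ≤ prn ∧ prn < 129 then some "GAGAN"
      else if 129 ≤ prn ∧ prn < 138 then some "MSAS"
      else none := by
  unfold pvTable pvConstellationMap
  simp only [List.foldl_cons, List.foldl_nil]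
  rw [pv_fold_setdefault_get?, pv_fold_setdefault_get?, pv_fold_setdefault_get?,
      pv_fold_setdefault_get?, pv_fold_setdefault_get?, pv_fold_setdefault_get?,
      pv_fold_setdefault_get?, pv_fold_setdefault_get?, pv_fold_setdefault_get?,
      pv_fold_setdefault_get?, pv_fold_setdefault_get?]
  simp only [PySem.Dict.get?_empty, PySem.List.mem_pyRange_one,
             pv_orElse_none, pv_orElse_if]

theorem pv_contains_range (lo hi x : Int) :
    (PySem.List.pyRange lo hi 1).contains x = decide (lo ≤ x ∧ x < hi) := by
  by_cases h : lo ≤ x ∧ x < hi <;>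
    simp [PySem.List.mem_pyRange_one, h]

theorem pv_match_if (c : Prop) [Decidable c] (a : String) (x : Option String)
    (f : String → String) (u : String) :
    (match (if c then some a else x) with | some n => f n | none => u)
      = if c then f a else (match x with | some n => f n | none => u) := by
  split_ifs <;> rfl

-- ===== VERDICT (by name: the statement is the Claim_ definition above) =====
set_option maxHeartbeats 1600000 in
theorem get_constellation_spec : Claim_equal_get_constellation := by
  intro prn _
  unfold Spec_get_constellation get_constellation get_constellation_alt
  rw [pv_get?_table]
  simp only [pvConstellationMap, pvFindA, pv_contains_range, decide_eq_true_eq,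
             pv_match_if]
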